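-- pv_equiv track=rewrite | github.com/HouMinXi/bkr2reportportal | bkr2reportportal.py | _extract_panic_from_console
-- ===== SOURCE A (Python) =====
-- FAILURE_STRINGS = [
--     r"Oops",
--     r"BUG",
--     r"Kernel panic",
--     r"Call Trace",
--     r"Call trace",
--     r"cut here",
--     r"Unit Hang",
--     r"watchdog: BUG: soft lockup - CPU",
--     r"saving vmcore",
--     r"saving vmcore-dmesg.txt complete",
--     r"Starting Kdump Vmcore Save Service",
-- ]
--
-- def _extract_panic_from_console(console_content, context_lines=100):
--     """
--     Analyze the console log to extract error messages and their context.
--     :param console_content: Console log content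
--     :param context_lines: Context line numbers
--     :return: Formatted error message
--     """
--     if not console_content:
--         return "No console log content available"
--
--     lines = console_content.split('\n')
--     error_blocks = []
--     # Used to track row indexes that have already been processed, avoiding duplication.
--     matched_indices = set()
--     for i, line in enumerate(lines):
--         # Check if the line has already been included in the previous error block.
--         if i in matched_indices:
--             continue
--
--         for pattern in FAILURE_STRINGS:
--
--             # Compute context scope
--             if pattern in line:
--                 start_line = max(0, i - context_lines)
--                 end_line = min(len(lines), i + context_lines + 1)
--
--                 # Mark these behaviors as handled to avoid repetition
--                 for j in range(start_line, end_line):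
--                     matched_indices.add(j)
--                 # Extract context block
--                 context_block = lines[start_line:end_line]
--                 error_blocks.append('\n'.join(context_block))
--                 break
--
--     if not error_blocks:
--         return "No panic-related errors found in console log"
--     # Formatted output, limiting the display of a maximum of 5 error blocks to avoid excessively long output.
--     max_blocks = 10
--     if len(error_blocks) > max_blocks:
--         error_blocks = error_blocks[:max_blocks]
--         error_blocks.append(f"... and {len(error_blocks) - max_blocks} more error blocks truncated")
--
--     return "\n\n".join([f"=== Error Block {i + 1} ===\n{block}" for i, block in enumerate(error_blocks)])
-- ===== SOURCE B (Python) =====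
-- FAILURE_STRINGS = [
--     r"Oops",
--     r"BUG",
--     r"Kernel panic",
--     r"Call Trace",
--     r"Call trace",
--     r"cut here",
--     r"Unit Hang",
--     r"watchdog: BUG: soft lockup - CPU",
--     r"saving vmcore",
--     r"saving vmcore-dmesg.txt complete",
--     r"Starting Kdump Vmcore Save Service",
-- ]
--
--
-- def _extract_panic_from_console(console_content, context_lines=100):
--     if not console_content:
--         return "No console log content available"
--
--     lines = console_content.split('\n')
--     # First pass: indices of every line containing any failure pattern.
--     match_idx = [i for i, line in enumerate(lines)
--                  if any(p in line for p in FAILURE_STRINGS)]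
--
--     # Second pass: walk the match table; after emitting a block for idx,
--     # skip every match index that falls before the block's end.
--     error_blocks = []
--     p = 0
--     n = len(match_idx)
--     while p < n:
--         idx = match_idx[p]
--         start = max(0, idx - context_lines)
--         end = min(len(lines), idx + context_lines + 1)
--         error_blocks.append('\n'.join(lines[start:end]))
--         p += 1
--         while p < n and match_idx[p] < idx + context_lines + 1:
--             p += 1
--
--     if not error_blocks:
--         return "No panic-related errors found in console log"
--
--     max_blocks = 10
--     if len(error_blocks) > max_blocks:
--         # the original message always reports 0 (it counts after truncating)
--         error_blocks = error_blocks[:max_blocks] + ["... and 0 more error blocks truncated"]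
--
--     return "\n\n".join(f"=== Error Block {i + 1} ===\n{block}"
--                        for i, block in enumerate(error_blocks))
-- ===== Notes on version B (the rewrite author's own statement) =====
-- stated objective: alternative
-- what changed: B replaces A's single pass over every line with a skip-set of marked indices by two passes: it first builds the table of all match-line indices, then walks that table with a pointer that jumps past match indices falling inside the block just emitted; the sentinel strings, the max-10 truncation with its always-zero leftover count line, and the join format are unchanged.
import Mathlib
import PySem

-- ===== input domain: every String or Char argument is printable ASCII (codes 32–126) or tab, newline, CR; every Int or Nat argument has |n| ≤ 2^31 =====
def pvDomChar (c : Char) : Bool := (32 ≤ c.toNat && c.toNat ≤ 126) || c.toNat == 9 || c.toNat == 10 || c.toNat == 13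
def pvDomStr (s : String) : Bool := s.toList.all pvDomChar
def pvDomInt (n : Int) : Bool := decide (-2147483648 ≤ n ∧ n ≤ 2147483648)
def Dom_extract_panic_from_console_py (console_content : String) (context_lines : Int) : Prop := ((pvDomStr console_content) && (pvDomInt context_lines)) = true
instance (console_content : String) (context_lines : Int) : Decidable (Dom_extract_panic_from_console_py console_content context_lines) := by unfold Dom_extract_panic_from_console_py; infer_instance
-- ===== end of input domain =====

-- B replaces A's every-line scan with a skip-set by a precomputed match-index
-- table walked with a pointer (objective: alternative decomposition, same cost).

-- ===== PORT A =====
-- module constant FAILURE_STRINGS (shared by both ports, as in the Python module)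
def pvFailureStrings : List String :=
  ["Oops", "BUG", "Kernel panic", "Call Trace", "Call trace", "cut here",
   "Unit Hang", "watchdog: BUG: soft lockup - CPU", "saving vmcore",
   "saving vmcore-dmesg.txt complete", "Starting Kdump Vmcore Save Service"]

-- one iteration of A's `for i, line in enumerate(lines)` loop
def pvAStep (lines : List String) (context_lines : Int)
    (st : PySem.Set Int × List String) (p : Int × String) : PySem.Set Int × List String :=
  if st.1.contains p.1 then st
  else
    match pvFailureStrings.find? (fun pat => PySem.Str.isIn pat p.2) with
    | none => st
    | some _ =>
      let start_line := max 0 (p.1 - context_lines)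
      let end_line := min ((lines.length : Int)) (p.1 + context_lines + 1)
      let matched := (PySem.List.pyRange start_line end_line).foldl (fun s j => s.add j) st.1
      (matched, st.2 ++ [PySem.Str.join "\n" (PySem.List.slice lines (some start_line) (some end_line))])

-- A's tail: sentinel, truncation (A recounts AFTER slicing, so it prints len-10 of the sliced list), join
def pvAFormat (error_blocks : List String) : String :=
  if error_blocks = [] then "No panic-related errors found in console log"
  else
    let eb :=
      if (10 : Int) < (error_blocks.length : Int) then
        let t := PySem.List.slice error_blocks none (some 10)
        t ++ ["... and " ++ PySem.Int.toStr ((t.length : Int) - 10) ++ " more error blocks truncated"]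
      else error_blocks
    PySem.Str.join "\n\n" ((PySem.List.enumerate eb).map
      (fun p => "=== Error Block " ++ PySem.Int.toStr (p.1 + 1) ++ " ===\n" ++ p.2))

def extract_panic_from_console_py (console_content : String) (context_lines : Int) : String :=
  if console_content = "" then "No console log content available"
  else
    let lines := (PySem.Str.split? console_content "\n").getD []
    let r := (PySem.List.enumerate lines).foldl (pvAStep lines context_lines)
      (PySem.Set.ofList [], [])
    pvAFormat r.2

-- ===== PORT B =====
-- Source B's pointer walk over the match-index table: emit a block for the current
-- index, then the inner `while` advances past match indices below the block end
def pvBPick (lines : List String) (context_lines : Int) : List Int → List String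
  | [] => []
  | idx :: rest =>
    let start := max 0 (idx - context_lines)
    let stop := min ((lines.length : Int)) (idx + context_lines + 1)
    PySem.Str.join "\n" (PySem.List.slice lines (some start) (some stop)) ::
      pvBPick lines context_lines (rest.dropWhile (fun j => decide (j < idx + context_lines + 1)))
  termination_by l => l.length
  decreasing_by simp only [List.length_cons]; exact Nat.lt_succ_of_le (List.length_dropWhile_le _ rest)

-- Source B's tail: same sentinels; the truncation line carries the constant zero count A always prints
def pvBFormat (error_blocks : List String) : String :=
  if error_blocks = [] then "No panic-related errors found in console log"
  else
    let eb :=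
      if (10 : Int) < (error_blocks.length : Int) then
        PySem.List.slice error_blocks none (some 10) ++ ["... and 0 more error blocks truncated"]
      else error_blocks
    PySem.Str.join "\n\n" ((PySem.List.enumerate eb).map
      (fun p => "=== Error Block " ++ PySem.Int.toStr (p.1 + 1) ++ " ===\n" ++ p.2))

def extract_panic_from_console_py_alt (console_content : String) (context_lines : Int) : String :=
  if console_content = "" then "No console log content available"
  else
    let lines := (PySem.Str.split? console_content "\n").getD []
    let match_idx := ((PySem.List.enumerate lines).filter
      (fun p => pvFailureStrings.any (fun pat => PySem.Str.isIn pat p.2))).map (fun p => p.1)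
    pvBFormat (pvBPick lines context_lines match_idx)

-- ===== PRECONDITION & SPEC =====
def Spec_extract_panic_from_console_py (console_content : String) (context_lines : Int) (out : String) : Prop := out = extract_panic_from_console_py_alt console_content context_lines
instance (console_content : String) (context_lines : Int) (out : String) : Decidable (Spec_extract_panic_from_console_py console_content context_lines out) := by unfold Spec_extract_panic_from_console_py; infer_instance

-- ===== CLAIM (what is proved, stated in full; the proofs are below) =====
def Claim_equal_extract_panic_from_console_py : Prop := ∀ (console_content : String) (context_lines : Int), Dom_extract_panic_from_console_py console_content context_lines → Spec_extract_panic_from_console_py console_content context_lines (extract_panic_from_console_py console_content context_lines)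

-- ===== LEMMAS AND PROOFS =====

-- the two tails agree: when truncation fires, A's recount is (take 10).length - 10 = 0
lemma pvFormat_eq (eb : List String) : pvAFormat eb = pvBFormat eb := by
  unfold pvAFormat pvBFormat
  by_cases h : eb = []
  · simp [h]
  · simp only [if_neg h]
    by_cases h10 : (10 : Int) < (eb.length : Int)
    · have hlen : (PySem.List.slice eb none (some 10)).length = 10 := by
        have hs := PySem.List.slice_to eb (b := 10) (by norm_num)
        rw [hs]; simp only [List.length_take]; omega
      have hmsg : "... and " ++ PySem.Int.toStr (((PySem.List.slice eb none (some 10)).length : Int) - 10)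
          ++ " more error blocks truncated" = "... and 0 more error blocks truncated" := by
        rw [hlen]; rfl
      simp only [if_pos h10, hmsg]
    · simp only [if_neg h10]

-- a dropWhile (< t) drops nothing when every element is ≥ t
lemma pvDropWhile_ge (t : Int) : ∀ (l : List Int), (∀ x ∈ l, t ≤ x) →
    l.dropWhile (fun j => decide (j < t)) = l := by
  intro l hl
  cases l with
  | nil => rfl
  | cons x xs =>
    have hx := hl x (by simp)
    have : ¬ x < t := by omega
    simp [this]

-- the heart: A's fold with a skip-set whose live part is {j < t} equals B's
-- pointer walk over the pending match indices with the same threshold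
lemma pvLoop_eq (lines : List String) (cl : Int) :
    ∀ (es : List (Int × String)) (S : PySem.Set Int) (t : Int) (acc : List String),
    es.Pairwise (fun p q => p.1 < q.1) →
    (∀ p ∈ es, 0 ≤ p.1 ∧ p.1 < (lines.length : Int)) →
    (∀ p ∈ es, S.contains p.1 = decide (p.1 < t)) →
    (es.foldl (pvAStep lines cl) (S, acc)).2
      = acc ++ pvBPick lines cl
          (((es.filter (fun p => pvFailureStrings.any (fun pat => PySem.Str.isIn pat p.2))).map
            (fun p => p.1)).dropWhile (fun j => decide (j < t))) := by
  intro es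
  induction es with
  | nil => intro S t acc _ _ _; simp [pvBPick]
  | cons hd tl ih =>
    intro S t acc hpair hbound hS
    obtain ⟨i, line⟩ := hd
    have hpair' := (List.pairwise_cons.mp hpair).2
    have hlt := (List.pairwise_cons.mp hpair).1
    have hbound' : ∀ p ∈ tl, 0 ≤ p.1 ∧ p.1 < (lines.length : Int) :=
      fun p hp => hbound p (List.mem_cons_of_mem _ hp)
    have hbi := hbound (i, line) (List.mem_cons_self ..)
    have hSi := hS (i, line) (List.mem_cons_self ..)
    have hStl : ∀ p ∈ tl, S.contains p.1 = decide (p.1 < t) :=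
      fun p hp => hS p (List.mem_cons_of_mem _ hp)
    simp only [List.foldl_cons]
    by_cases hc : S.contains i = true
    · -- A skips this line; a possible match index i is < t, dropped by B's dropWhile
      have hit : i < t := by
        have h' := hSi; rw [hc] at h'; exact of_decide_eq_true h'.symm
      have hstep : pvAStep lines cl (S, acc) (i, line) = (S, acc) := by
        unfold pvAStep
        exact if_pos hc
      rw [hstep, ih S t acc hpair' hbound' hStl]
      by_cases hany : pvFailureStrings.any (fun pat => PySem.Str.isIn pat line) = true
      · rw [List.filter_cons_of_pos (p := fun p => pvFailureStrings.any fun pat => PySem.Str.isIn pat p.2) (l := tl) (a := (i, line)) (by simpa using hany)]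
        simp only [List.map_cons, List.dropWhile_cons]
        have : decide (i < t) = true := decide_eq_true hit
        rw [this]
        simp
      · rw [List.filter_cons_of_neg (p := fun p => pvFailureStrings.any fun pat => PySem.Str.isIn pat p.2) (l := tl) (a := (i, line)) (by simpa using hany)]
    · -- A processes this line (t ≤ i)
      have hti : t ≤ i := by
        rw [Bool.not_eq_true] at hc
        have h' := hSi; rw [hc] at h'
        have := of_decide_eq_false h'.symm; omega
      rw [Bool.not_eq_true] at hc
      by_cases hfind : pvFailureStrings.find? (fun pat => PySem.Str.isIn pat line) = none
      · -- no pattern matches: A leaves the state, B's filter drops the line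
        have hany : pvFailureStrings.any (fun pat => PySem.Str.isIn pat line) = false := by
          rw [List.any_eq_false]
          exact fun pat hpat => List.find?_eq_none.mp hfind pat hpat
        have hstep : pvAStep lines cl (S, acc) (i, line) = (S, acc) := by
          unfold pvAStep
          rw [hc]
          simp only [Bool.false_eq_true, if_false, hfind]
        rw [hstep, ih S t acc hpair' hbound' hStl, List.filter_cons_of_neg (p := fun p => pvFailureStrings.any fun pat => PySem.Str.isIn pat p.2) (l := tl) (a := (i, line)) (by simpa using hany)]
      · -- a pattern matches: A emits a block and marks the interval; B emits the
        -- same block and its inner while drops the match indices < i + cl + 1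
        obtain ⟨pat0, hpat0⟩ := Option.ne_none_iff_exists'.mp hfind
        have hany : pvFailureStrings.any (fun pat => PySem.Str.isIn pat line) = true := by
          rw [List.any_eq_true]
          have hp2 := List.find?_some (p := fun pat => PySem.Str.isIn pat line) hpat0
          exact ⟨pat0, List.mem_of_find?_eq_some hpat0, hp2⟩
        have hstep : pvAStep lines cl (S, acc) (i, line)
            = ((PySem.List.pyRange (max 0 (i - cl)) (min ((lines.length : Int)) (i + cl + 1))).foldl
                 (fun s j => s.add j) S,
               acc ++ [PySem.Str.join "\n" (PySem.List.slice lines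
                 (some (max 0 (i - cl))) (some (min ((lines.length : Int)) (i + cl + 1))))]) := by
          unfold pvAStep
          rw [hc]
          simp only [Bool.false_eq_true, if_false, hpat0]
        rw [hstep]
        set S' := (PySem.List.pyRange (max 0 (i - cl)) (min ((lines.length : Int)) (i + cl + 1))).foldl
          (fun s j => s.add j) S with hS'def
        have hS' : ∀ p ∈ tl, S'.contains p.1 = decide (p.1 < i + cl + 1) := by
          intro p hp
          have hgt : i < p.1 := hlt p hp
          have hb := hbound' p hp
          have hmem : p.1 ∈ S' ↔ p.1 ∈ S ∨ ∃ b ∈ PySem.List.pyRange (max 0 (i - cl))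
              (min ((lines.length : Int)) (i + cl + 1)), p.1 = b := by
            rw [hS'def]; exact PySem.Set.mem_foldl_add ..
          by_cases hlt' : p.1 < i + cl + 1
          · have hin : p.1 ∈ S' := by
              rw [hmem]; right
              exact ⟨p.1, PySem.List.mem_pyRange_one.mpr (by omega), rfl⟩
            rw [(PySem.Set.contains_iff ..).mpr hin]
            simp [hlt']
          · have hnin : ¬ p.1 ∈ S' := by
              rw [hmem]
              rintro (hin | ⟨b, hb', rfl⟩)
              · have h2 := (PySem.Set.contains_iff ..).mpr hin
                rw [hStl p hp] at h2
                have := of_decide_eq_true h2; omega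
              · have := PySem.List.mem_pyRange_one.mp hb'; omega
            have : S'.contains p.1 = false := by
              rw [← Bool.not_eq_true]
              exact fun hcon => hnin ((PySem.Set.contains_iff ..).mp hcon)
            rw [this]
            simp [hlt']
        rw [ih S' (i + cl + 1) _ hpair' hbound' hS',
          List.filter_cons_of_pos (p := fun p => pvFailureStrings.any fun pat => PySem.Str.isIn pat p.2) (l := tl) (a := (i, line)) (by simpa using hany)]
        simp only [List.map_cons, List.dropWhile_cons]
        have : decide (i < t) = false := decide_eq_false (by omega)
        rw [this]
        simp only [Bool.false_eq_true, if_false]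
        rw [pvBPick]
        simp [List.append_assoc]

-- ===== VERDICT (by name: the statement is the Claim_ definition above) =====
theorem extract_panic_from_console_py_spec : Claim_equal_extract_panic_from_console_py := by
  intro console_content context_lines _
  unfold Spec_extract_panic_from_console_py
  unfold extract_panic_from_console_py extract_panic_from_console_py_alt
  by_cases hempty : console_content = ""
  · simp [hempty]
  · simp only [if_neg hempty]
    set lines := (PySem.Str.split? console_content "\n").getD [] with hlines
    rw [pvFormat_eq]
    congr 1
    have h := pvLoop_eq lines context_lines (PySem.List.enumerate lines) (PySem.Set.ofList []) 0 []
      (PySem.List.pairwise_lt_enumerate ..)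
      (by
        intro p hp
        obtain ⟨k, hk, rfl⟩ := (PySem.List.mem_enumerate_iff ..).mp hp
        refine ⟨by simp, by simp; omega⟩)
      (by
        intro p hp
        obtain ⟨k, hk, rfl⟩ := (PySem.List.mem_enumerate_iff ..).mp hp
        simp [PySem.Set.contains, PySem.Set.ofList])
    rw [h, List.nil_append]
    congr 1
    apply pvDropWhile_ge
    intro x hx
    simp only [List.mem_map, List.mem_filter] at hx
    obtain ⟨p, ⟨hp, _⟩, rfl⟩ := hx
    obtain ⟨k, hk, rfl⟩ := (PySem.List.mem_enumerate_iff ..).mp hp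
    simp
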